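-- pv_equiv track=rewrite | github.com/dmitriypaskov/python_HW6 | EXEMPLE.py | not_primes
-- ===== SOURCE A (Python) =====
-- def not_primes(a, b):
--     if a < b <= 20000:
--         prost = "2357"
--         arr = []
--         arr1 = []
--         for i in range(a, b):
--             j = 0
--             app = True
--             while j < len(str(i)):
--                 if str(i)[j] in prost:
--                     app = True
--                     j += 1
--                 else:
--                     app = False
--                     break
--             if app:
--                 arr.append(i)
--         for i in arr:
--             for j in range(2, i):
--                 if i != j and i % j == 0:
--                     arr1.append(i)
--                     break
--         return arr1
-- ===== SOURCE B (Python) =====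
-- def not_primes(a, b):
--     if not (a < b <= 20000):
--         return None
--     res = []
--     for i in range(a, b):
--         if all(c in "2357" for c in str(i)):
--             j = 2
--             while j * j <= i:
--                 if i % j == 0:
--                     res.append(i)
--                     break
--                 j += 1
--     return res
-- ===== Notes on version B (the rewrite author's own statement) =====
-- stated objective: faster
-- what changed: Two-pass build (digit filter list, then full trial division up to i with break) replaced by a single pass that tests each digit-valid i for a divisor only up to sqrt(i), appending immediately.
import Mathlib
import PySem

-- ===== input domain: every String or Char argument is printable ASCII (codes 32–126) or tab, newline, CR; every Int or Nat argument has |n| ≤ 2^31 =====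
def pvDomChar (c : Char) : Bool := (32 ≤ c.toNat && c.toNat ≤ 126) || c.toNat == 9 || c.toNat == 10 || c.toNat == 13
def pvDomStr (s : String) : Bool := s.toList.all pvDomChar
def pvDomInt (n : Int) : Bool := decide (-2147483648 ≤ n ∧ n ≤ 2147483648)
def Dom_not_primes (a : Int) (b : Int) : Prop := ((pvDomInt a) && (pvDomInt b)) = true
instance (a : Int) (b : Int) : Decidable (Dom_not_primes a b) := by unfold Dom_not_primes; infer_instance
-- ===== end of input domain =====

-- B replaces A's two passes (digit-filter list, then trial division over all of range(2,i) with break)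
-- by a single pass testing divisors only up to sqrt(i); objective: faster.

-- ===== PORT A =====
-- the inner 'while j < len(str(i))' digit loop of A
def digitA (s : List Char) (j : Nat) : Bool :=
  if h : j < s.length then
    if s[j] ∈ (['2', '3', '5', '7'] : List Char) then digitA s (j + 1) else false
  else true
termination_by s.length - j

-- the inner 'for j in range(2, i): … break' loop of A
def innerA (i : Int) : List Int → List Int → List Int
  | [], arr1 => arr1
  | j :: rest, arr1 =>
      if i ≠ j ∧ PySem.Int.mod i j = 0 then arr1 ++ [i] else innerA i rest arr1

def not_primes (a : Int) (b : Int) : Option (List Int) :=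
  if a < b ∧ b ≤ 20000 then
    let arr := (PySem.List.pyRange a b 1).foldl
      (fun arr i => if digitA (PySem.Int.toChars i) 0 then arr ++ [i] else arr) []
    let arr1 := arr.foldl (fun arr1 i => innerA i (PySem.List.pyRange 2 i 1) arr1) []
    some arr1
  else none

-- ===== PORT B =====
-- the 'while j * j <= i' trial-division loop of B
def trialB (i : Int) (j : Int) (res : List Int) : List Int :=
  if h : j * j ≤ i then
    if PySem.Int.mod i j = 0 then res ++ [i] else trialB i (j + 1) res
  else res
termination_by (i + 2 - j).toNat
decreasing_by
  have hji : j ≤ i := by nlinarith [mul_self_nonneg j]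
  omega

def not_primes_alt (a : Int) (b : Int) : Option (List Int) :=
  if a < b ∧ b ≤ 20000 then
    some ((PySem.List.pyRange a b 1).foldl
      (fun res i =>
        if (PySem.Int.toChars i).all (fun c => c ∈ (['2', '3', '5', '7'] : List Char)) then
          trialB i 2 res
        else res) [])
  else none

-- ===== PRECONDITION & SPEC =====
def Spec_not_primes (a : Int) (b : Int) (out : Option (List Int)) : Prop := out = not_primes_alt a b
instance (a : Int) (b : Int) (out : Option (List Int)) : Decidable (Spec_not_primes a b out) := by unfold Spec_not_primes; infer_instance

-- ===== CLAIM (what is proved, stated in full; the proofs are below) =====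
def Claim_equal_not_primes : Prop := ∀ (a : Int) (b : Int), Dom_not_primes a b → Spec_not_primes a b (not_primes a b)

-- ===== LEMMAS AND PROOFS =====

lemma digitA_eq_all (s : List Char) (j : Nat) :
    digitA s j = (s.drop j).all (fun c => c ∈ (['2', '3', '5', '7'] : List Char)) := by
  fun_induction digitA s j with
  | case1 j h hc ih =>
      rw [List.drop_eq_getElem_cons h, List.all_cons, ih]
      simp [hc]
  | case2 j h hc =>
      rw [List.drop_eq_getElem_cons h, List.all_cons]
      simp [hc]
  | case3 j h =>
      rw [List.drop_eq_nil_of_le (by omega)]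
      rfl

lemma innerA_eq (i : Int) (L : List Int) (acc : List Int) :
    innerA i L acc =
      if L.any (fun j => decide (i ≠ j ∧ PySem.Int.mod i j = 0)) then acc ++ [i] else acc := by
  induction L with
  | nil => rfl
  | cons j rest ih =>
      by_cases h : i ≠ j ∧ PySem.Int.mod i j = 0
      · simp [innerA, h]
      · simp [innerA, h, ih]

lemma trialB_pos (i j : Int) (res : List Int) (hj : 0 ≤ j)
    (h : ∃ k : Int, j ≤ k ∧ k * k ≤ i ∧ PySem.Int.mod i k = 0) :
    trialB i j res = res ++ [i] := by
  fun_induction trialB i j res with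
  | case1 j hsq hmod => rfl
  | case2 j hsq hmod ih =>
      apply ih (by omega)
      obtain ⟨k, hk1, hk2, hk3⟩ := h
      refine ⟨k, ?_, hk2, hk3⟩
      rcases eq_or_lt_of_le hk1 with rfl | hlt
      · exact absurd hk3 hmod
      · omega
  | case3 j hsq =>
      obtain ⟨k, hk1, hk2, hk3⟩ := h
      exact absurd hk2 (by nlinarith)

lemma trialB_neg (i j : Int) (res : List Int)
    (h : ¬ ∃ k : Int, j ≤ k ∧ k * k ≤ i ∧ PySem.Int.mod i k = 0) :
    trialB i j res = res := by
  fun_induction trialB i j res with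
  | case1 j hsq hmod => exact absurd ⟨_, le_refl _, hsq, hmod⟩ h
  | case2 j hsq hmod ih =>
      apply ih
      rintro ⟨k, hk1, hk2, hk3⟩
      exact h ⟨k, by omega, hk2, hk3⟩
  | case3 j hsq => rfl

-- A's trial division over all of range(2, i) finds a divisor iff one exists below sqrt(i)
lemma anyDiv_iff (i : Int) :
    (PySem.List.pyRange 2 i 1).any (fun j => decide (i ≠ j ∧ PySem.Int.mod i j = 0)) = true ↔
      ∃ k : Int, 2 ≤ k ∧ k * k ≤ i ∧ PySem.Int.mod i k = 0 := by
  rw [List.any_eq_true]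
  constructor
  · rintro ⟨d, hd, hcond⟩
    rw [PySem.List.mem_pyRange_one] at hd
    rw [decide_eq_true_iff] at hcond
    obtain ⟨hne, hmod⟩ := hcond
    rw [PySem.Int.mod_eq_zero_iff_dvd] at hmod
    obtain ⟨e, he⟩ := hmod
    have hd2 : 2 ≤ d := hd.1
    have hdi : d < i := hd.2
    have he1 : 1 ≤ e := by nlinarith
    have he2 : 2 ≤ e := by
      rcases eq_or_lt_of_le he1 with rfl | h2
      · omega
      · omega
    by_cases hsq : d * d ≤ i
    · exact ⟨d, hd2, hsq, by rw [PySem.Int.mod_eq_zero_iff_dvd]; exact ⟨e, he⟩⟩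
    · refine ⟨e, he2, by nlinarith, ?_⟩
      rw [PySem.Int.mod_eq_zero_iff_dvd]
      exact ⟨d, by rw [he]; ring⟩
  · rintro ⟨k, hk1, hk2, hk3⟩
    have hki : k < i := by nlinarith
    refine ⟨k, ?_, ?_⟩
    · rw [PySem.List.mem_pyRange_one]; omega
    · rw [decide_eq_true_iff]; exact ⟨by omega, hk3⟩

-- ===== VERDICT (by name: the statement is the Claim_ definition above) =====
theorem not_primes_spec : Claim_equal_not_primes := by
  intro a b _
  unfold Spec_not_primes not_primes not_primes_alt
  by_cases hg : a < b ∧ b ≤ 20000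
  · simp only [if_pos hg]
    congr 1
    -- A side: first loop is a filter
    rw [PySem.List.foldl_append_if_eq_filter
      (p := fun i => digitA (PySem.Int.toChars i) 0)]
    -- A side: second loop is a filter
    rw [PySem.List.foldl_congr_mem
      (g := fun acc i =>
        if (PySem.List.pyRange 2 i 1).any (fun j => decide (i ≠ j ∧ PySem.Int.mod i j = 0)) then
          acc ++ [i] else acc)
      (h := fun acc i _ => innerA_eq i _ acc)]
    rw [PySem.List.foldl_append_if_eq_filter]
    -- B side: single loop is a filter with the conjoined test
    rw [PySem.List.foldl_congr_mem
      (g := fun res i =>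
        if ((PySem.Int.toChars i).all (fun c => c ∈ (['2', '3', '5', '7'] : List Char)) &&
            (PySem.List.pyRange 2 i 1).any (fun j => decide (i ≠ j ∧ PySem.Int.mod i j = 0))) then
          res ++ [i] else res)
      (h := ?_)]
    · rw [PySem.List.foldl_append_if_eq_filter, List.nil_append, List.nil_append, List.nil_append,
        List.filter_filter]
      apply List.filter_congr
      intro i _
      rw [digitA_eq_all, List.drop_zero, Bool.and_comm]
    · intro res i _
      by_cases hall : (PySem.Int.toChars i).all (fun c => c ∈ (['2', '3', '5', '7'] : List Char))
      · by_cases hex : ∃ k : Int, 2 ≤ k ∧ k * k ≤ i ∧ PySem.Int.mod i k = 0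
        · rw [if_pos hall, trialB_pos i 2 res (by norm_num) hex]
          have hany := (anyDiv_iff i).mpr hex
          beta_reduce
          rw [hall, hany]
          simp
        · rw [if_pos hall, trialB_neg i 2 res hex]
          have hany : ¬ ((PySem.List.pyRange 2 i 1).any
              (fun j => decide (i ≠ j ∧ PySem.Int.mod i j = 0)) = true) :=
            fun hc => hex ((anyDiv_iff i).mp hc)
          rw [Bool.not_eq_true] at hany
          beta_reduce
          rw [hall, hany]
          simp
      · rw [if_neg hall]
        rw [Bool.not_eq_true] at hall
        beta_reduce
        rw [hall]
        simp
  · simp only [if_neg hg]
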